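-- pv_equiv track=rewrite | github.com/jasonchen736/REST_API_Cake_Splitting_Algorithm | cake/utils.py | get_smallest_repeating_segment
-- ===== SOURCE A (Python) =====
-- import collections
--
-- def get_smallest_repeating_segment(sequence):
--     sequence_size = len(sequence)
--     max_rotations = sequence_size // 2
--
--     original_sequence = collections.deque(sequence)
--     next_sequence = collections.deque(sequence)
--     rotations = 1
--     next_sequence.rotate(1)
--     while next_sequence != original_sequence and rotations <= max_rotations:
--         rotations += 1
--         next_sequence.rotate(1)
--
--     if next_sequence != original_sequence:
--         smallest_repeating_segment = sequence
--         smallest_repeating_segment_size = sequence_size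
--         repetitions = 1
--     else:
--         smallest_repeating_segment = ''.join(next_sequence)[:rotations]
--         smallest_repeating_segment_size = rotations
--         repetitions = sequence_size // rotations
--
--     return smallest_repeating_segment, smallest_repeating_segment_size, repetitions
-- ===== SOURCE B (Python) =====
-- def get_smallest_repeating_segment(sequence):
--     sequence_size = len(sequence)
--     period = (sequence + sequence).find(sequence, 1)
--     if 0 < period and period * 2 <= sequence_size:
--         return sequence[:period], period, sequence_size // period
--     return sequence, sequence_size, 1
-- ===== Notes on version B (the rewrite author's own statement) =====
-- stated objective: idiomatic
-- what changed: Replaces the incremental deque-rotation while-loop (rotate by one, compare, repeat) by the classic string-doubling trick: the smallest rotation period is (sequence + sequence).find(sequence, 1), then one divisibility-style bound check.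
-- intended difference: On the empty string A returns ('', 1, 0) — segment size 1 with 0 repetitions, leftover loop state (rotations=1, 0//1) — while B returns the intended ('', 0, 1). — e.g. on get_smallest_repeating_segment(""): A returns ("", 1, 0), B returns ("", 0, 1)
import Mathlib
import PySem

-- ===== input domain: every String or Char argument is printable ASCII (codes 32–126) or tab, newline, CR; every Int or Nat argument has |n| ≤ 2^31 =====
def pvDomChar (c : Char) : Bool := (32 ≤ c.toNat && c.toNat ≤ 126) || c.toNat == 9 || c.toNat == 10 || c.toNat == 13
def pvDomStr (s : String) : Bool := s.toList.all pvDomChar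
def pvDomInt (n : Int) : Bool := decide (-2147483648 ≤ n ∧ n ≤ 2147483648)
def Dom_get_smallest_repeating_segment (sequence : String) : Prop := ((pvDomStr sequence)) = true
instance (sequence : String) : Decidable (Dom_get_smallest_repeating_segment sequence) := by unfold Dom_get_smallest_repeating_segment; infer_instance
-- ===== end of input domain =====

-- B replaces A's incremental deque-rotation while-loop by the classic string-doubling trick
-- ((sequence + sequence).find(sequence, 1)); they differ only on the empty string (D_ below).

-- ===== PORT A =====
-- deque.rotate(1): move the last element to the front (exact for a deque of characters)
def pvRot1 (l : List Char) : List Char :=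
  match l.reverse with
  | [] => []
  | x :: xs => x :: xs.reverse

-- 'while next_sequence != original_sequence and rotations <= max_rotations: rotations += 1; next_sequence.rotate(1)'
-- (fuel is only a termination device: the caller passes fuel = max_rotations + 1 - rotations,
--  and while rotations ≤ maxR holds the fuel is never exhausted)
def pvLoopA (orig : List Char) (maxR : Nat) : Nat → List Char → Nat → Nat × List Char
  | 0, next, rotations => (rotations, next)
  | fuel + 1, next, rotations =>
      if next ≠ orig ∧ rotations ≤ maxR then
        pvLoopA orig maxR fuel (pvRot1 next) (rotations + 1)
      else (rotations, next)

def get_smallest_repeating_segment (sequence : String) : String × Int × Int :=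
  let cs := sequence.toList
  let sequence_size := cs.length                 -- len(sequence) (kept as a Nat: it is nonnegative)
  let max_rotations := sequence_size / 2         -- sequence_size // 2 (both nonneg: Nat division is Python's //)
  let st := pvLoopA cs max_rotations max_rotations (pvRot1 cs) 1
  if st.2 ≠ cs then
    (sequence, (sequence_size : Int), 1)
  else
    -- ''.join(next_sequence)[:rotations]: joining a deque of single characters is exactly its character list
    (String.ofList (st.2.take st.1), (st.1 : Int),
      PySem.Int.floordiv (sequence_size : Int) (st.1 : Int))

-- ===== PORT B =====
def get_smallest_repeating_segment_alt (sequence : String) : String × Int × Int :=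
  let sequence_size := PySem.Str.len sequence
  let period := PySem.Str.findFrom (sequence ++ sequence) sequence 1
  if 0 < period ∧ period * 2 ≤ sequence_size then
    (PySem.Str.slice sequence none (some period), period,
      PySem.Int.floordiv sequence_size period)
  else
    (sequence, sequence_size, 1)

-- ===== PRECONDITION & SPEC =====
-- On the empty string A returns ('', 1, 0) — segment size 1 with 0 repetitions is leftover loop state
-- (rotations = 1, 0 // 1), evidently wrong for a size-0 input — while B returns the intended ('', 0, 1).
def D_get_smallest_repeating_segment (sequence : String) : Prop := sequence = ""
instance (sequence : String) : Decidable (D_get_smallest_repeating_segment sequence) := by unfold D_get_smallest_repeating_segment; infer_instance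

def Spec_get_smallest_repeating_segment (sequence : String) (out : String × Int × Int) : Prop := ¬ D_get_smallest_repeating_segment sequence → out = get_smallest_repeating_segment_alt sequence
instance (sequence : String) (out : String × Int × Int) : Decidable (Spec_get_smallest_repeating_segment sequence out) := by unfold Spec_get_smallest_repeating_segment; infer_instance

def pvDiffWitness_get_smallest_repeating_segment : String := ""
def pvDiffWitnessOut_get_smallest_repeating_segment : (String × Int × Int) × (String × Int × Int) :=
  (("", 1, 0), ("", 0, 1))

-- ===== CLAIM (what is proved, stated in full; the proofs are below) =====
def Claim_unchanged_get_smallest_repeating_segment : Prop := ∀ (sequence : String), Dom_get_smallest_repeating_segment sequence → Spec_get_smallest_repeating_segment sequence (get_smallest_repeating_segment sequence)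
def Claim_changed_get_smallest_repeating_segment : Prop := Dom_get_smallest_repeating_segment (pvDiffWitness_get_smallest_repeating_segment) ∧ D_get_smallest_repeating_segment (pvDiffWitness_get_smallest_repeating_segment) ∧ get_smallest_repeating_segment (pvDiffWitness_get_smallest_repeating_segment) = pvDiffWitnessOut_get_smallest_repeating_segment.1 ∧ get_smallest_repeating_segment_alt (pvDiffWitness_get_smallest_repeating_segment) = pvDiffWitnessOut_get_smallest_repeating_segment.2 ∧ pvDiffWitnessOut_get_smallest_repeating_segment.1 ≠ pvDiffWitnessOut_get_smallest_repeating_segment.2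
def Claim_exact_get_smallest_repeating_segment : Prop := ∀ (sequence : String), Dom_get_smallest_repeating_segment sequence → D_get_smallest_repeating_segment sequence → get_smallest_repeating_segment sequence ≠ get_smallest_repeating_segment_alt sequence

-- ===== LEMMAS AND PROOFS =====

-- moving the last element to the front is rotating left by length - 1
theorem pvRot1_eq_rotate (l : List Char) : pvRot1 l = l.rotate (l.length - 1) := by
  unfold pvRot1
  rcases h : l.reverse with _ | ⟨x, xs⟩
  · simp_all
  · have hl : l = xs.reverse ++ [x] := by
      have := congrArg List.reverse h; simpa using this
    subst hl
    have hlen : (xs.reverse ++ [x]).length - 1 = xs.reverse.length := by simp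
    rw [hlen, List.rotate_eq_drop_append_take (by simp)]
    simp

-- rotating by any multiple of a self-rotation amount is the identity
theorem rotate_mul_self (cs : List Char) (a : Nat) (h : cs.rotate a = cs) :
    ∀ m : Nat, cs.rotate (m * a) = cs := by
  intro m
  induction m with
  | zero => simp
  | succ m ih =>
      have : cs.rotate (m * a + a) = cs := by
        rw [← List.rotate_rotate, ih, h]
      simpa [Nat.succ_mul] using this

-- iterating pvRot1 k times is rotating left by k * (n - 1)
theorem pvRot1_iterate (cs : List Char) (k : Nat) :
    pvRot1^[k] cs = cs.rotate (k * (cs.length - 1)) := by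
  induction k with
  | zero => simp
  | succ k ih =>
      rw [Function.iterate_succ_apply', ih, pvRot1_eq_rotate,
        List.length_rotate, List.rotate_rotate, Nat.succ_mul]

-- right-rotating k times fixes cs iff left-rotating by k does
theorem rotate_mul_pred_iff (cs : List Char) (k : Nat) (hn : cs ≠ []) :
    cs.rotate (k * (cs.length - 1)) = cs ↔ cs.rotate k = cs := by
  obtain ⟨m, hm⟩ : ∃ m, cs.length = m + 1 :=
    ⟨cs.length - 1, by have := List.length_pos_iff.mpr hn; omega⟩
  have hfull : cs.rotate (m + 1) = cs := by rw [← hm]; exact List.rotate_length cs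
  rw [hm]
  simp only [Nat.add_sub_cancel]
  constructor
  · intro h
    have h1 : cs.rotate (k * (m + 1)) = cs := rotate_mul_self cs (m + 1) hfull k
    have h2 : cs.rotate (k * m + k) = cs.rotate k := by
      rw [← List.rotate_rotate, h]
    rw [← h2, show k * m + k = k * (m + 1) by ring, h1]
  · intro h
    simpa [Nat.mul_comm] using rotate_mul_self cs k h m

-- there is a positive self-rotation amount (the length itself)
theorem exists_pos_rotate (cs : List Char) (h : cs ≠ []) :
    ∃ k : Nat, 0 < k ∧ cs.rotate k = cs :=
  ⟨cs.length, List.length_pos_iff.mpr h, List.rotate_length cs⟩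

-- A's loop state matches the original iff the plain left rotation does
theorem iterate_eq_iff (cs : List Char) (k : Nat) (h : cs ≠ []) :
    pvRot1^[k] cs = cs ↔ cs.rotate k = cs := by
  rw [pvRot1_iterate]; exact rotate_mul_pred_iff cs k h

-- the minimal positive self-rotation amount divides the length (Bezout / gcd argument)
theorem minRot_dvd (cs : List Char) (h : cs ≠ []) :
    Nat.find (exists_pos_rotate cs h) ∣ cs.length := by
  set r := Nat.find (exists_pos_rotate cs h) with hr
  obtain ⟨hrpos, hrot⟩ := Nat.find_spec (exists_pos_rotate cs h)
  have hn : 0 < cs.length := List.length_pos_iff.mpr h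
  set n := cs.length with hnn
  set g := Nat.gcd r n with hg
  have hgpos : 0 < g := Nat.gcd_pos_of_pos_right _ hn
  have hgn : g ∣ n := Nat.gcd_dvd_right r n
  have hrotg : cs.rotate g = cs := by
    by_cases hgeq : g = n
    · rw [hgeq, hnn]; exact List.rotate_length cs
    · have hglt : g < n := lt_of_le_of_ne (Nat.le_of_dvd hn hgn) hgeq
      have hbez : (g : ℤ) = r * Nat.gcdA r n + n * Nat.gcdB r n := Nat.gcd_eq_gcd_ab r n
      set t : Nat := ((Nat.gcdA r n) % (n : ℤ)).toNat with ht
      have hnz : (n : ℤ) ≠ 0 := by exact_mod_cast hn.ne'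
      have htc : (t : ℤ) = Nat.gcdA r n % (n : ℤ) :=
        Int.toNat_of_nonneg (Int.emod_nonneg _ hnz)
      have h1 : (t : ℤ) ≡ Nat.gcdA r n [ZMOD (n : ℤ)] := by
        rw [htc]; exact (Int.emod_emod_of_dvd _ dvd_rfl)
      have h2 : (t : ℤ) * r ≡ Nat.gcdA r n * r [ZMOD (n : ℤ)] := h1.mul_right _
      have h3 : Nat.gcdA r n * r ≡ (g : ℤ) [ZMOD (n : ℤ)] := by
        rw [Int.ModEq]
        conv_rhs => rw [hbez]
        rw [show (r : ℤ) * Nat.gcdA r n + n * Nat.gcdB r n = Nat.gcdA r n * r + (n:ℤ) * Nat.gcdB r n by ring]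
        rw [Int.add_mul_emod_self_left]
      have hmod : ((t * r : Nat) : ℤ) % (n : ℤ) = (g : ℤ) % (n : ℤ) := by
        push_cast
        exact (h2.trans h3)
      have hmodN : (t * r) % n = g % n := by exact_mod_cast hmod
      calc cs.rotate g = cs.rotate (g % cs.length) := by rw [Nat.mod_eq_of_lt hglt]
        _ = cs.rotate (t * r % cs.length) := by rw [← hmodN]
        _ = cs.rotate (t * r) := List.rotate_mod cs (t * r)
        _ = cs := rotate_mul_self cs r hrot t
  have hle : r ≤ g := Nat.find_min' (exists_pos_rotate cs h) ⟨hgpos, hrotg⟩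
  have hge : g ≤ r := Nat.le_of_dvd hrpos (Nat.gcd_dvd_left r n)
  have : r = g := le_antisymm hle hge
  rw [this]; exact hgn

-- A's while loop stops at the first matching rotation count, capped at max_rotations + 1
theorem loop_spec (cs : List Char) (h : cs ≠ []) (maxR : Nat) :
    ∀ fuel k, 1 ≤ k → k ≤ min (Nat.find (exists_pos_rotate cs h)) (maxR + 1) →
      fuel = maxR + 1 - k →
      pvLoopA cs maxR fuel (pvRot1^[k] cs) k =
        (min (Nat.find (exists_pos_rotate cs h)) (maxR + 1),
         pvRot1^[min (Nat.find (exists_pos_rotate cs h)) (maxR + 1)] cs) := by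
  set r := Nat.find (exists_pos_rotate cs h) with hrdef
  intro fuel
  induction fuel with
  | zero =>
      intro k hk1 hkmin hfuel
      have hmin : min r (maxR + 1) = k := by omega
      rw [pvLoopA, hmin]
  | succ fuel ih =>
      intro k hk1 hkmin hfuel
      by_cases hkm : k = min r (maxR + 1)
      · -- k = r (k ≤ maxR rules out the cap): the rotation matches, the loop stops
        have hkr : k = r := by omega
        have hmatch : pvRot1^[k] cs = cs := by
          rw [iterate_eq_iff cs k h, hkr]
          exact (Nat.find_spec (exists_pos_rotate cs h)).2
        rw [pvLoopA, if_neg (by simp [hmatch]), hkm]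
      · have hklt : k < min r (maxR + 1) := lt_of_le_of_ne hkmin hkm
        have hne : pvRot1^[k] cs ≠ cs := by
          rw [Ne, iterate_eq_iff cs k h]
          intro hc
          exact Nat.find_min (exists_pos_rotate cs h) (by omega) ⟨by omega, hc⟩
        have hstep := Function.iterate_succ_apply' pvRot1 k cs
        rw [pvLoopA, if_pos ⟨hne, by omega⟩, ← hstep]
        exact ih (k + 1) (by omega) (by omega) (by omega)

-- the sliding window of the doubled string is a rotation
theorem window_iff (cs : List Char) (i : Nat) (hi : i ≤ cs.length) :
    cs <+: (cs ++ cs).drop i ↔ cs.rotate i = cs := by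
  rw [List.drop_append, show i - cs.length = 0 by omega, List.drop_zero,
    List.prefix_iff_eq_take, List.take_append,
    List.take_of_length_le (show (cs.drop i).length ≤ cs.length by simp),
    List.length_drop, show cs.length - (cs.length - i) = i by omega,
    ← List.rotate_eq_drop_append_take hi]
  exact eq_comm

-- (s+s).find(s, 1) is the minimal positive self-rotation amount
theorem findFrom_eq_minRot (cs : List Char) (h : cs ≠ []) :
    PySem.Chars.findFrom (cs ++ cs) cs ((1:ℕ):ℤ) none =
      ((Nat.find (exists_pos_rotate cs h) : Nat) : ℤ) := by
  set r := Nat.find (exists_pos_rotate cs h) with hrdef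
  have hn : 0 < cs.length := List.length_pos_iff.mpr h
  have hlen1 : (1:ℕ) ≤ (cs ++ cs).length := by simp; omega
  have hrn : r ≤ cs.length :=
    Nat.find_min' (exists_pos_rotate cs h) ⟨hn, List.rotate_length cs⟩
  obtain ⟨hr0, hrot⟩ := Nat.find_spec (exists_pos_rotate cs h)
  have hne : PySem.Chars.findFrom (cs ++ cs) cs ((1:ℕ):ℤ) none ≠ -1 := by
    rw [Ne, PySem.Chars.findFrom_natCast_eq_neg_one_iff _ _ 1 hlen1, not_not]
    have hd : (cs ++ cs).drop 1 = cs.drop 1 ++ cs := by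
      rw [List.drop_append, show 1 - cs.length = 0 by omega, List.drop_zero]
    rw [hd]
    exact (List.suffix_append _ cs).isInfix
  obtain ⟨h1F, hpref, hminF⟩ := PySem.Chars.findFrom_natCast_spec (cs ++ cs) cs 1 hlen1 hne
  set F := PySem.Chars.findFrom (cs ++ cs) cs ((1:ℕ):ℤ) none with hFdef
  have hFc : F = ((F.toNat : ℕ) : ℤ) :=
    (Int.toNat_of_nonneg (le_trans (by norm_num) h1F)).symm
  set f := F.toNat with hfdef
  have hf1 : 1 ≤ f := by omega
  have hfn : f ≤ cs.length := by
    by_contra hcon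
    refine hminF cs.length (by omega) (by omega) ?_
    rw [List.drop_append, Nat.sub_self, List.drop_length, List.nil_append, List.drop_zero]
  have hfr : f = r := by
    have h1 : r ≤ f := Nat.find_min' (exists_pos_rotate cs h)
      ⟨by omega, (window_iff cs f hfn).mp hpref⟩
    have h2 : ¬ r < f := fun hc =>
      hminF r (by omega) hc ((window_iff cs r hrn).mpr hrot)
    omega
  rw [hFc, hfr]

-- ===== VERDICT (by name: the statement is the Claim_ definition above) =====
theorem get_smallest_repeating_segment_spec : Claim_unchanged_get_smallest_repeating_segment := by
  intro s _
  unfold Spec_get_smallest_repeating_segment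
  intro hnd
  have h : s.toList ≠ [] := by
    intro hc
    apply hnd
    have h2 := congrArg String.ofList hc
    rwa [String.ofList_toList] at h2
  set cs := s.toList with hcs
  have hn : 0 < cs.length := List.length_pos_iff.mpr h
  set n := cs.length with hnn
  set r := Nat.find (exists_pos_rotate cs h) with hrdef
  obtain ⟨hr0, hrot⟩ := Nat.find_spec (exists_pos_rotate cs h)
  have hrn : r ≤ n := Nat.find_min' (exists_pos_rotate cs h) ⟨hn, List.rotate_length cs⟩
  have hdvd : r ∣ n := minRot_dvd cs h
  have hloop := loop_spec cs h (n / 2) (n / 2) 1 (le_refl 1) (by omega) (by omega)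
  rw [Function.iterate_one] at hloop
  have hB : PySem.Str.findFrom (s ++ s) s 1 = ((r : Nat) : ℤ) := by
    rw [PySem.Str.findFrom_eq]
    have hd : (s ++ s).toList = cs ++ cs := by simp [hcs]
    rw [hd]
    have := findFrom_eq_minRot cs h
    simpa using this
  unfold get_smallest_repeating_segment get_smallest_repeating_segment_alt
  simp only [← hcs, ← hnn, hloop, hB, PySem.Str.len_eq]
  by_cases hcase : r ≤ n / 2
  · -- the periodic case: both return (sequence[:r], r, n // r)
    have hK : min r (n / 2 + 1) = r := by omega
    have hmatch : pvRot1^[r] cs = cs := (iterate_eq_iff cs r h).mpr hrot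
    rw [hK, hmatch]
    rw [if_neg (show ¬ cs ≠ cs by simp),
      if_pos ⟨by exact_mod_cast hr0,
        by exact_mod_cast (Nat.le_div_iff_mul_le (by norm_num)).mp hcase⟩]
    have ht : (PySem.Str.slice s none (some ((r : Nat) : ℤ))).toList = cs.take r := by
      rw [PySem.Str.toList_slice, ← hcs]; simp [pysem]
    have hsl : PySem.Str.slice s none (some ((r : Nat) : ℤ)) = String.ofList (cs.take r) :=
      (String.ofList_toList).symm.trans (congrArg String.ofList ht)
    rw [hsl]
  · -- the aperiodic case: r = n, both return (sequence, n, 1)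
    have hr_eq : r = n := by
      obtain ⟨q, hq⟩ := hdvd
      have h2 : ¬ (r * 2 ≤ n) := fun hc =>
        hcase ((Nat.le_div_iff_mul_le (by norm_num)).mpr hc)
      by_contra hne'
      have hlt : r < n := lt_of_le_of_ne hrn hne'
      have hq2 : 2 ≤ q := by
        rcases Nat.lt_or_ge q 2 with hq1 | hq1
        · interval_cases q <;> omega
        · exact hq1
      have : r * 2 ≤ r * q := Nat.mul_le_mul_left r hq2
      omega
    have hBcond : ¬ (0 < ((r : Nat) : ℤ) ∧ ((r : Nat) : ℤ) * 2 ≤ ((n : Nat) : ℤ)) := by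
      rintro ⟨-, hc⟩
      have hc2 : r * 2 ≤ n := by exact_mod_cast hc
      omega
    conv_rhs => rw [if_neg hBcond]
    by_cases hsmall : n ≤ n / 2 + 1
    · have hK : min r (n / 2 + 1) = r := by omega
      have hmatch : pvRot1^[r] cs = cs := (iterate_eq_iff cs r h).mpr hrot
      rw [hK, hmatch, if_neg (show ¬ cs ≠ cs by simp)]
      simp only [Prod.ext_iff]
      refine ⟨?_, ?_, ?_⟩
      · rw [hr_eq, hnn, List.take_length, hcs, String.ofList_toList]
      · rw [hr_eq]
      · rw [hr_eq, PySem.Int.floordiv_natCast, Nat.div_self hn]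
        norm_num
    · have hK : min r (n / 2 + 1) = n / 2 + 1 := by omega
      have hne : pvRot1^[n / 2 + 1] cs ≠ cs := by
        rw [Ne, iterate_eq_iff cs _ h]
        intro hc
        exact Nat.find_min (exists_pos_rotate cs h) (by omega) ⟨by omega, hc⟩
      rw [hK, if_pos hne]

theorem get_smallest_repeating_segment_changed : Claim_changed_get_smallest_repeating_segment := by
  unfold Claim_changed_get_smallest_repeating_segment; decide

theorem get_smallest_repeating_segment_tight : Claim_exact_get_smallest_repeating_segment := by
  intro s _ hD
  unfold D_get_smallest_repeating_segment at hD
  subst hD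
  decide
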